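-- pv_equiv track=rewrite | github.com/Gadielo03/CRC-Py | src/app/chat-server.py | decode_hamming_code
-- ===== SOURCE A (Python) =====
-- def calculate_parity_bits(data):
--     """Calculate parity bits for Hamming code."""
--     n = len(data)
--     r = 1
--     while (2**r) < (n + r + 1):
--         r += 1
--     return r
--
-- def decode_hamming_code(data):
--     """Decode Hamming code by removing parity bits."""
--     n = len(data)
--     r = calculate_parity_bits(data)
--     corrected_data = list(data)
--     j = 0
--     decoded_data = []
--
--     for i in range(1, n + 1):
--         if i != 2 ** j:
--             decoded_data.append(corrected_data[i - 1])
--         else: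
--             j += 1
--
--     return ''.join(decoded_data)
-- ===== SOURCE B (Python) =====
-- def decode_hamming_code(data):
--     """Decode Hamming code by removing parity bits."""
--     n = len(data)
--     parts = []
--     k = 1
--     while 2 ** k <= n:
--         parts.append(data[2 ** k : 2 ** (k + 1) - 1])
--         k += 1
--     return ''.join(parts)
-- ===== Notes on version B (the rewrite author's own statement) =====
-- stated objective: faster
-- what changed: B replaces A's per-character loop with a power-of-two counter by collecting the contiguous data-bit runs data[2**k : 2**(k+1)-1] as O(log n) whole slices and joining them, so the copying happens in bulk slice operations instead of n per-character appends.
import Mathlib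
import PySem

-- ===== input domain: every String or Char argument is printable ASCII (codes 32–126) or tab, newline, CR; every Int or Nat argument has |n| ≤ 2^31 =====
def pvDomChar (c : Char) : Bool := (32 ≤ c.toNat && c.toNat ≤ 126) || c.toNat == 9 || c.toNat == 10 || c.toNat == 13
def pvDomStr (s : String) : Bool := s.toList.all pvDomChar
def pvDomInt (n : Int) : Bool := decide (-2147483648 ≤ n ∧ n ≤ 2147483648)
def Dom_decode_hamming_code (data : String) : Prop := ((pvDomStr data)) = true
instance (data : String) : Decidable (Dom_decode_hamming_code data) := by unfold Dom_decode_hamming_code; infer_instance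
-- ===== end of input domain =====

-- B removes parity bits by concatenating the contiguous data runs data[2^k : 2^(k+1)-1]
-- as whole slices (alternative decomposition) instead of A's per-character counter-driven scan.


-- needed by the termination argument of calculate_parity_bits_go
theorem pvTwoMulLeTwoPow (r : Nat) : 2 * r ≤ 2 ^ r := by
  induction r with
  | zero => simp
  | succ m ih =>
    rcases Nat.eq_zero_or_pos m with h | h
    · subst h; simp
    · have h2 : 2 ≤ 2 ^ m := Nat.one_lt_two_pow_iff.mpr (by omega)
      calc 2 * (m + 1) = 2 * m + 2 := by ring
        _ ≤ 2 ^ m + 2 ^ m := by omega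
        _ = 2 ^ (m + 1) := by ring

-- ===== PORT A =====
-- while (2**r) < (n + r + 1): r += 1
def calculate_parity_bits_go (n r : Nat) : Nat :=
  if 2 ^ r < n + r + 1 then calculate_parity_bits_go n (r + 1) else r
termination_by n + 1 - r
decreasing_by
  have := pvTwoMulLeTwoPow r
  omega

def calculate_parity_bits (data : String) : Nat :=
  calculate_parity_bits_go data.toList.length 1

def decode_hamming_code (data : String) : String :=
  let cs := data.toList
  let n := cs.length
  let _r := calculate_parity_bits data
  -- the index i - 1 is always in range (1 ≤ i ≤ n), so Python's corrected_data[i-1] never raises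
  let st := (PySem.List.pyRange 1 ((n : Int) + 1) 1).foldl
    (fun (st : List Char × Nat) (i : Int) =>
      if i ≠ (2 : Int) ^ st.2 then (st.1 ++ [PySem.List.pyGetD cs (i - 1) ' '], st.2)
      else (st.1, st.2 + 1)) ([], 0)
  String.mk st.1

-- ===== PORT B =====
-- while 2**k <= n: parts.append(data[2**k : 2**(k+1)-1]); k += 1
def decode_hamming_code_alt_go (cs : List Char) (n k : Nat) : List Char :=
  if 2 ^ k ≤ n then
    PySem.List.slice cs (some ((2 ^ k : Nat) : Int)) (some ((2 ^ (k + 1) - 1 : Nat) : Int))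
      ++ decode_hamming_code_alt_go cs n (k + 1)
  else []
termination_by n + 1 - 2 ^ k
decreasing_by
  have h1 : 2 ^ k < 2 ^ (k + 1) := Nat.pow_lt_pow_right (by omega) (by omega)
  have h1' : 1 ≤ 2 ^ k := Nat.one_le_two_pow
  omega

def decode_hamming_code_alt (data : String) : String :=
  String.mk (decode_hamming_code_alt_go data.toList data.toList.length 1)

-- ===== PRECONDITION & SPEC =====
def Spec_decode_hamming_code (data : String) (out : String) : Prop := out = decode_hamming_code_alt data
instance (data : String) (out : String) : Decidable (Spec_decode_hamming_code data out) := by unfold Spec_decode_hamming_code; infer_instance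

-- ===== CLAIM (what is proved, stated in full; the proofs are below) =====
def Claim_equal_decode_hamming_code : Prop := ∀ (data : String), Dom_decode_hamming_code data → Spec_decode_hamming_code data (decode_hamming_code data)

-- ===== LEMMAS AND PROOFS =====

-- is m a power of two?
def pvIsP2 (m : Nat) : Bool := 2 ^ Nat.log 2 m == m

theorem pvIsP2_pow (t : Nat) : pvIsP2 (2 ^ t) = true := by
  simp [pvIsP2, Nat.log_pow (by omega : 1 < 2)]

theorem pvIsP2_false_of_between {k m : Nat} (h1 : 2 ^ k < m) (h2 : m < 2 ^ (k + 1)) :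
    pvIsP2 m = false := by
  by_contra h
  have he : 2 ^ Nat.log 2 m = m := by
    simpa [pvIsP2] using (Bool.not_eq_false _).mp h
  rw [← he] at h1 h2
  have hk1 := (Nat.pow_lt_pow_iff_right (by omega : 1 < 2)).mp h1
  have hk2 := (Nat.pow_lt_pow_iff_right (by omega : 1 < 2)).mp h2
  omega

-- the characters A and B both keep, starting from 0-based position s
def pvSpecFrom (cs : List Char) (s : Nat) : List Char :=
  ((List.range' s (cs.length - s)).filter (fun p => !pvIsP2 (p + 1))).map (fun p => cs.getD p ' ')

theorem pvSpecFrom_nil (cs : List Char) (s : Nat) (h : cs.length ≤ s) :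
    pvSpecFrom cs s = [] := by
  simp [pvSpecFrom, Nat.sub_eq_zero_of_le h]

theorem pvSpecFrom_pow (cs : List Char) (s : Nat) (h : s < cs.length)
    (hp : pvIsP2 (s + 1) = true) : pvSpecFrom cs s = pvSpecFrom cs (s + 1) := by
  unfold pvSpecFrom
  have hd : cs.length - s = (cs.length - (s + 1)) + 1 := by omega
  rw [hd, List.range'_succ]
  simp [hp]

theorem pvSpecFrom_keep (cs : List Char) (s : Nat) (h : s < cs.length)
    (hp : pvIsP2 (s + 1) = false) :
    pvSpecFrom cs s = cs.getD s ' ' :: pvSpecFrom cs (s + 1) := by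
  unfold pvSpecFrom
  have hd : cs.length - s = (cs.length - (s + 1)) + 1 := by omega
  rw [hd, List.range'_succ]
  simp [hp]

-- a run of positions with no power of two among p+1 is copied verbatim
theorem pvSpecFrom_run (cs : List Char) (m : Nat) : ∀ (s : Nat),
    (∀ p, s ≤ p → p < s + m → pvIsP2 (p + 1) = false) →
    pvSpecFrom cs s = (cs.drop s).take m ++ pvSpecFrom cs (s + m) := by
  induction m with
  | zero => intro s _; simp
  | succ m ih =>
    intro s hnp
    by_cases hs : s < cs.length
    · have hget : cs.drop s = cs[s] :: cs.drop (s + 1) := List.drop_eq_getElem_cons hs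
      rw [pvSpecFrom_keep cs s hs (hnp s (le_refl s) (by omega)), hget,
          List.take_succ_cons, List.getD_eq_getElem cs ' ' hs,
          ih (s + 1) (fun p h1 h2 => hnp p (by omega) (by omega)),
          show s + 1 + m = s + (m + 1) from by omega]
      simp
    · rw [pvSpecFrom_nil cs s (by omega), pvSpecFrom_nil cs (s + (m + 1)) (by omega)]
      simp [List.drop_eq_nil_of_le (by omega : cs.length ≤ s)]

-- ===== A's loop equals pvSpecFrom =====
theorem pvA_loop (cs : List Char) : ∀ fuel s (j : Nat) (acc : List Char),
    cs.length - s ≤ fuel →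
    s + 1 ≤ 2 ^ j → (j = 0 ∨ 2 ^ (j - 1) < s + 1) →
    ((PySem.List.pyRange ((s : Int) + 1) ((cs.length : Int) + 1) 1).foldl
      (fun (st : List Char × Nat) (i : Int) =>
        if i ≠ (2 : Int) ^ st.2 then (st.1 ++ [PySem.List.pyGetD cs (i - 1) ' '], st.2)
        else (st.1, st.2 + 1)) (acc, j)).1
      = acc ++ pvSpecFrom cs s := by
  intro fuel
  induction fuel with
  | zero =>
    intro s j acc hf _ _
    rw [PySem.List.pyRange_one_eq_nil (by omega : (cs.length : Int) + 1 ≤ (s : Int) + 1)]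
    simp [pvSpecFrom_nil cs s (by omega)]
  | succ fuel ih =>
    intro s j acc hf h1 h2
    by_cases hs : s < cs.length
    · rw [PySem.List.pyRange_one_cons (by omega : (s : Int) + 1 < (cs.length : Int) + 1)]
      rw [List.foldl_cons]
      by_cases hp : pvIsP2 (s + 1) = true
      · -- s+1 is a power of two; the invariant forces s + 1 = 2 ^ j
        have hsj : s + 1 = 2 ^ j := by
          rcases h2 with h2 | h2
          · subst h2; simp at h1 ⊢; omega
          · have he : 2 ^ Nat.log 2 (s + 1) = s + 1 := by
              simpa [pvIsP2] using hp
            rw [← he] at h1 h2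
            have hj : j - 1 < Nat.log 2 (s + 1) :=
              (Nat.pow_lt_pow_iff_right (by omega : 1 < 2)).mp h2
            have hj2 : Nat.log 2 (s + 1) ≤ j :=
              (Nat.pow_le_pow_iff_right (by omega : 1 < 2)).mp h1
            have ht : Nat.log 2 (s + 1) = j := by omega
            rw [← he, ht]
        have hcond : ((s : Int) + 1) = (2 : Int) ^ j := by exact_mod_cast hsj
        rw [if_neg (by simp [hcond])]
        have h1' : 1 ≤ 2 ^ j := Nat.one_le_two_pow
        have hinv1 : s + 1 + 1 ≤ 2 ^ (j + 1) := by rw [pow_succ]; omega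
        have hinv2 : j + 1 = 0 ∨ 2 ^ (j + 1 - 1) < s + 1 + 1 :=
          Or.inr (by simp only [Nat.add_sub_cancel]; omega)
        have hrec := ih (s + 1) (j + 1) acc (by omega) hinv1 hinv2
        push_cast at hrec
        rw [pvSpecFrom_pow cs s hs hp]
        exact hrec
      · -- not a power of two: s + 1 ≠ 2 ^ j, the character is kept
        have hne : ((s : Int) + 1) ≠ (2 : Int) ^ j := by
          intro hc
          have : s + 1 = 2 ^ j := by exact_mod_cast hc
          rw [this] at hp
          exact hp (pvIsP2_pow j)
        rw [if_pos (by simpa using hne)]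
        have hidx : ((s : Int) + 1 - 1) = ((s : Nat) : Int) := by ring
        rw [hidx, PySem.List.pyGetD_natCast]
        have hlt : s + 1 < 2 ^ j := by
          rcases Nat.lt_or_ge (s + 1) (2 ^ j) with h | h
          · exact h
          · exfalso
            have : s + 1 = 2 ^ j := by omega
            rw [this] at hp; exact hp (pvIsP2_pow j)
        have h2' : j = 0 ∨ 2 ^ (j - 1) < s + 1 + 1 := h2.imp id (fun h => by omega)
        have hrec := ih (s + 1) j (acc ++ [cs.getD s ' ']) (by omega) (by omega) h2'
        push_cast at hrec
        rw [pvSpecFrom_keep cs s hs (by simpa using hp),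
            show acc ++ cs.getD s ' ' :: pvSpecFrom cs (s + 1)
               = (acc ++ [cs.getD s ' ']) ++ pvSpecFrom cs (s + 1) from by simp]
        exact hrec
    · rw [PySem.List.pyRange_one_eq_nil (by omega : (cs.length : Int) + 1 ≤ (s : Int) + 1)]
      simp [pvSpecFrom_nil cs s (by omega)]

-- ===== B's loop equals pvSpecFrom =====
theorem pvB_loop (cs : List Char) : ∀ fuel (k : Nat),
    cs.length + 1 - 2 ^ k ≤ fuel →
    decode_hamming_code_alt_go cs cs.length k = pvSpecFrom cs (2 ^ k) := by
  intro fuel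
  induction fuel with
  | zero =>
    intro k hf
    rw [decode_hamming_code_alt_go]
    rw [if_neg (by omega)]
    rw [pvSpecFrom_nil cs _ (by omega)]
  | succ fuel ih =>
    intro k hf
    rw [decode_hamming_code_alt_go]
    by_cases hk : 2 ^ k ≤ cs.length
    · rw [if_pos hk]
      have hpow : 2 ^ (k + 1) = 2 * 2 ^ k := by ring
      have h1 : 1 ≤ 2 ^ k := Nat.one_le_two_pow
      rw [PySem.List.slice_natCast]
      have hih := ih (k + 1) (by omega)
      rw [hih]
      have hrun := pvSpecFrom_run cs (2 ^ k - 1) (2 ^ k)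
        (fun p hp1 hp2 => pvIsP2_false_of_between (k := k) (by omega) (by omega))
      have hsub : 2 ^ (k + 1) - 1 - 2 ^ k = 2 ^ k - 1 := by omega
      rw [hsub, hrun]
      have hend : 2 ^ k + (2 ^ k - 1) = 2 ^ (k + 1) - 1 := by omega
      rw [hend]
      have hk1 : 1 ≤ 2 ^ (k + 1) := Nat.one_le_two_pow
      have hs1 : 2 ^ (k + 1) - 1 + 1 = 2 ^ (k + 1) := by omega
      by_cases he : 2 ^ (k + 1) - 1 < cs.length
      · rw [pvSpecFrom_pow cs _ he (by rw [hs1]; exact pvIsP2_pow (k + 1)), hs1]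
      · rw [pvSpecFrom_nil cs _ (by omega), pvSpecFrom_nil cs _ (by omega)]
    · rw [if_neg hk]
      rw [pvSpecFrom_nil cs _ (by omega)]

theorem pvSpecFrom_zero_two (cs : List Char) : pvSpecFrom cs 0 = pvSpecFrom cs 2 := by
  by_cases h0 : 0 < cs.length
  · rw [pvSpecFrom_pow cs 0 h0 (by simpa using pvIsP2_pow 0)]
    by_cases h1 : 1 < cs.length
    · exact pvSpecFrom_pow cs 1 h1 (by simpa using pvIsP2_pow 1)
    · rw [pvSpecFrom_nil cs 1 (by omega), pvSpecFrom_nil cs 2 (by omega)]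
  · rw [pvSpecFrom_nil cs 0 (by omega), pvSpecFrom_nil cs 2 (by omega)]

-- ===== VERDICT (by name: the statement is the Claim_ definition above) =====
theorem decode_hamming_code_spec : Claim_equal_decode_hamming_code := by
  intro data _
  unfold Spec_decode_hamming_code decode_hamming_code decode_hamming_code_alt
  set cs := data.toList with hcs
  have hA := pvA_loop cs cs.length 0 0 [] (by omega) (by simp) (Or.inl rfl)
  have hB := pvB_loop cs (cs.length + 1 - 2) 1 (by omega)
  simp only at hA hB ⊢
  rw [show ((0 : Nat) : Int) + 1 = (1 : Int) by norm_num] at hA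
  rw [hA, hB, pvSpecFrom_zero_two]
  simp
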